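-- pv_equiv track=rewrite | github.com/SCappella/riddler | 2020-05-22-states/states.py | longest_mackerel
-- ===== SOURCE A (Python) =====
-- def mackerel_state(states, word):
--     mackerel_states = [state for state in states if not (set(state) & set(word))]
--     if len(mackerel_states) == 1:
--         return mackerel_states[0]
--
-- def longest_mackerel(states, words):
--     # casefold words/states
--     states = [state.casefold() for state in states]
--     words = [word.casefold() for word in words]
--
--     words = sorted(words, key=lambda word: len(word), reverse=True)
--
--     for word in words:
--         state = mackerel_state(states, word)
--         if state is not None:
--             return (word, state)
-- ===== SOURCE B (Python) =====
-- def longest_mackerel(states, words):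
--     states = [state.casefold() for state in states]
--     state_sets = [set(state) for state in states]
--     candidates = []
--     for word in words:
--         w = word.casefold()
--         letters = set(w)
--         disjoint = [st for st, ss in zip(states, state_sets) if not (ss & letters)]
--         if len(disjoint) == 1:
--             candidates.append((w, disjoint[0]))
--     if not candidates:
--         return None
--     return max(candidates, key=lambda p: len(p[0]))
-- ===== Notes on version B (the rewrite author's own statement) =====
-- stated objective: faster
-- what changed: Replaces A's sort-by-length-then-first-hit early-return loop with a single pass over words in original order that collects all unique-disjoint-state candidates and then picks the longest with max; per-state letter sets are built once instead of on every word, and the sort is eliminated (A's stable descending sort plus first hit equals first-maximal max over original order).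
import Mathlib
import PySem

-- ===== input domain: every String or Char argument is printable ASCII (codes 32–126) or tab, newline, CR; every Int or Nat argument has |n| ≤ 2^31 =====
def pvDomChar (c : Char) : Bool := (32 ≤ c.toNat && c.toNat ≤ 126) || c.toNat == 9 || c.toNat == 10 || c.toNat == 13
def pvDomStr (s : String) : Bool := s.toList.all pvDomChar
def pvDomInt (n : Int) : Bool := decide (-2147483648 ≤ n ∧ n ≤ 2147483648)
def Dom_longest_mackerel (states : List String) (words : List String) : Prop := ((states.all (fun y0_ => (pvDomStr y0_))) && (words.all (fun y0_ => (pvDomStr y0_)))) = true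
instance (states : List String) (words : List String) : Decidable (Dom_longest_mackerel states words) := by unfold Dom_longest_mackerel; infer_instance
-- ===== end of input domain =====

-- ===== PORT A =====
-- B is a different decomposition of the same task: no sort, one pass collecting candidates, then max.
-- helper: port of mackerel_state
def mackerel_state (states : List String) (word : String) : Option String :=
  let mackerel_states := states.filter (fun state =>
    (PySem.Set.inter (PySem.Set.ofList state.toList) (PySem.Set.ofList word.toList)).isEmpty)
  if mackerel_states.length = 1 then mackerel_states.head? else none

-- helper: A's for-loop with early return
def lmLoop (states : List String) : List String → Option (String × String)
  | [] => none
  | word :: rest =>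
    match mackerel_state states word with
    | some state => some (word, state)
    | none => lmLoop states rest

def longest_mackerel (states : List String) (words : List String) : Option (String × String) :=
  let states := states.map PySem.Str.lower
  let words := words.map PySem.Str.lower
  let words := PySem.List.sorted words (fun word => PySem.Str.len word) true
  lmLoop states words

-- ===== PORT B =====
def longest_mackerel_alt (states : List String) (words : List String) : Option (String × String) :=
  let states := states.map PySem.Str.lower
  let stateSets := states.map (fun state => PySem.Set.ofList state.toList)
  let candidates := words.foldl (fun acc word =>
    let w := PySem.Str.lower word
    let letters := PySem.Set.ofList w.toList
    let disjoint := (states.zip stateSets).filterMap (fun p =>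
      if (PySem.Set.inter p.2 letters).isEmpty then some p.1 else none)
    match disjoint with
    | [st] => acc ++ [(w, st)]
    | _ => acc) []
  PySem.List.max? candidates (fun p => PySem.Str.len p.1)

-- ===== PRECONDITION & SPEC =====
def Spec_longest_mackerel (states : List String) (words : List String) (out : Option (String × String)) : Prop := out = longest_mackerel_alt states words
instance (states : List String) (words : List String) (out : Option (String × String)) : Decidable (Spec_longest_mackerel states words out) := by unfold Spec_longest_mackerel; infer_instance

-- ===== CLAIM (what is proved, stated in full; the proofs are below) =====
def Claim_equal_longest_mackerel : Prop := ∀ (states : List String) (words : List String), Dom_longest_mackerel states words → Spec_longest_mackerel states words (longest_mackerel states words)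

-- ===== LEMMAS AND PROOFS =====

-- per-word candidate map, over the lowered state list
def lmCand (states : List String) (word : String) : Option (String × String) :=
  (mackerel_state states word).map (fun st => (word, st))

theorem lmCand_len {states : List String} {word : String} {c : String × String}
    (h : lmCand states word = some c) : PySem.Str.len c.1 = PySem.Str.len word := by
  unfold lmCand at h
  cases hm : mackerel_state states word with
  | none => simp [hm] at h
  | some st => simp [hm] at h; subst h; rfl

-- A's loop is head-of-filterMap
theorem lmLoop_eq_head (states : List String) (L : List String) :
    lmLoop states L = (L.filterMap (lmCand states)).head? := by
  induction L with
  | nil => rfl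
  | cons w rest ih =>
    cases hm : mackerel_state states w <;>
      simp [lmLoop, hm, lmCand, ih]

-- B's zip/filterMap of precomputed sets is A's filter
theorem zip_filterMap_eq_filter (S : List String) (letters : PySem.Set Char) :
    (S.zip (S.map (fun state => PySem.Set.ofList state.toList))).filterMap (fun p =>
      if (PySem.Set.inter p.2 letters).isEmpty then some p.1 else none)
    = S.filter (fun st => (PySem.Set.inter (PySem.Set.ofList st.toList) letters).isEmpty) := by
  induction S with
  | nil => rfl
  | cons s t ih =>
    simp only [List.map_cons, List.zip_cons_cons, List.filterMap_cons, List.filter_cons]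
    cases (PySem.Set.inter (PySem.Set.ofList s.toList) letters).isEmpty <;>
      · simp
        simpa using ih

-- a length-1 match is the guarded head
theorem match_len_one (acc : List (String × String)) (w : String) (L : List String) :
    (match L with | [st] => acc ++ [(w, st)] | _ => acc)
    = acc ++ ((if L.length = 1 then L.head? else none).map (fun st => (w, st))).toList := by
  match L with
  | [] => simp
  | [a] => simp
  | a :: b :: t => simp

-- B's per-word step appends exactly lmCand
theorem b_step_eq (S : List String) (acc : List (String × String)) (w : String) :
    (let letters := PySem.Set.ofList w.toList
     let disjoint := (S.zip (S.map (fun state => PySem.Set.ofList state.toList))).filterMap (fun p =>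
        if (PySem.Set.inter p.2 letters).isEmpty then some p.1 else none)
     match disjoint with
     | [st] => acc ++ [(w, st)]
     | _ => acc)
    = acc ++ (lmCand S w).toList := by
  show (match (S.zip (S.map (fun state => PySem.Set.ofList state.toList))).filterMap (fun p =>
        if (PySem.Set.inter p.2 (PySem.Set.ofList w.toList)).isEmpty then some p.1 else none) with
     | [st] => acc ++ [(w, st)]
     | _ => acc) = _
  rw [zip_filterMap_eq_filter]
  unfold lmCand mackerel_state
  exact match_len_one acc w _

-- B's fold builds the candidate list = filterMap of lmCand
theorem b_fold_eq (S : List String) (W : List String) (acc : List (String × String)) :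
    W.foldl (fun acc word =>
      let w := PySem.Str.lower word
      let letters := PySem.Set.ofList w.toList
      let disjoint := (S.zip (S.map (fun state => PySem.Set.ofList state.toList))).filterMap (fun p =>
        if (PySem.Set.inter p.2 letters).isEmpty then some p.1 else none)
      match disjoint with
      | [st] => acc ++ [(w, st)]
      | _ => acc) acc
    = acc ++ (W.map PySem.Str.lower).filterMap (lmCand S) := by
  induction W generalizing acc with
  | nil => simp
  | cons w t ih =>
    simp only [List.foldl_cons, List.map_cons, List.filterMap_cons]
    rw [b_step_eq S acc (PySem.Str.lower w), ih]
    cases lmCand S (PySem.Str.lower w) <;> simp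

-- the running-max step of PySem.List.max? lifted to an optional new element
def mstep (key : (String × String) → Int) (r : Option (String × String)) (o : Option (String × String)) :
    Option (String × String) :=
  match o with
  | none => r
  | some c =>
    match r with
    | none => some c
    | some m => if key m < key c then some c else some m

theorem insertBy_cons {α : Type} (bf : α → α → Bool) (x y : α) (ys : List α) :
    PySem.List.insertBy bf x (y :: ys)
    = if bf x y then x :: y :: ys else y :: PySem.List.insertBy bf x ys := rfl

-- core stability lemma: inserting w into a descending-sorted accumulator moves the head
-- of the filterMapped candidates exactly as the running-max step does
theorem insert_head_step (S : List String) (w : String)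
    (acc : List String) (hp : acc.Pairwise (fun a b => PySem.Str.len b ≤ PySem.Str.len a)) :
    ((PySem.List.insertBy (fun a b => decide (PySem.Str.len b < PySem.Str.len a)) w acc).filterMap (lmCand S)).head?
    = mstep (fun p => PySem.Str.len p.1) ((acc.filterMap (lmCand S)).head?) (lmCand S w) := by
  induction acc with
  | nil =>
    cases hc : lmCand S w <;> simp [PySem.List.insertBy, mstep, hc]
  | cons y ys ih =>
    rcases List.pairwise_cons.mp hp with ⟨h1, h2⟩
    rw [insertBy_cons]
    by_cases hb : PySem.Str.len y < PySem.Str.len w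
    · rw [if_pos (by simpa using hb)]
      cases hc : lmCand S w with
      | none => simp [List.filterMap_cons, hc, mstep]
      | some c =>
        rw [List.filterMap_cons, hc, List.head?_cons]
        cases hr : ((y :: ys).filterMap (lmCand S)).head? with
        | none => simp [mstep]
        | some m =>
          have hmem : m ∈ (y :: ys).filterMap (lmCand S) :=
            List.mem_of_mem_head? (by simp [hr])
          rcases List.mem_filterMap.mp hmem with ⟨z, hz, hcz⟩
          have hlt : PySem.Str.len m.1 < PySem.Str.len c.1 := by
            rw [lmCand_len hcz, lmCand_len hc]
            rcases List.mem_cons.mp hz with h | h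
            · subst h; exact hb
            · exact lt_of_le_of_lt (h1 z h) hb
          have hlt' : m.1.length < c.1.length := by
            simp only [PySem.Str.len] at hlt; exact_mod_cast hlt
          simp [mstep, hlt']
    · rw [if_neg (by simpa using hb)]
      rw [List.filterMap_cons, List.filterMap_cons]
      cases hy : lmCand S y with
      | none => exact ih h2
      | some m =>
        rw [List.head?_cons, List.head?_cons]
        cases hc : lmCand S w with
        | none => simp [mstep]
        | some c =>
          have hle : PySem.Str.len c.1 ≤ PySem.Str.len m.1 := by
            rw [lmCand_len hc, lmCand_len hy]
            exact le_of_not_gt hb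
          have hle' : c.1.length ≤ m.1.length := by
            simp only [PySem.Str.len] at hle; exact_mod_cast hle
          simp [mstep]
          omega

-- the main bridge: first hit over the descending stable sort = running max over original order
theorem sorted_head_eq_max (S : List String) (W : List String) :
    ((PySem.List.sorted W (fun word => PySem.Str.len word) true).filterMap (lmCand S)).head?
    = (W.filterMap (lmCand S)).foldl (fun acc x =>
        match acc with
        | none => some x
        | some m => if PySem.Str.len m.1 < PySem.Str.len x.1 then some x else some m) none := by
  induction W using List.reverseRecOn with
  | nil => rfl
  | append_singleton W w ih =>
    have hs : PySem.List.sorted (W ++ [w]) (fun word => PySem.Str.len word) true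
        = PySem.List.insertBy (fun a b => decide (PySem.Str.len b < PySem.Str.len a)) w
            (PySem.List.sorted W (fun word => PySem.Str.len word) true) := by
      simp [PySem.List.sorted, List.foldl_append]
    rw [hs, insert_head_step S w _ (PySem.List.sorted_pairwise_rev W _), ih]
    rw [List.filterMap_append]
    cases hc : lmCand S w with
    | none => simp [hc, mstep]
    | some c => simp [hc, mstep, List.foldl_append]

-- ===== VERDICT (by name: the statement is the Claim_ definition above) =====
theorem longest_mackerel_spec : Claim_equal_longest_mackerel := by
  intro states words _
  show longest_mackerel states words = longest_mackerel_alt states words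
  unfold longest_mackerel longest_mackerel_alt
  dsimp only
  rw [lmLoop_eq_head, b_fold_eq, List.nil_append, sorted_head_eq_max]
  simp only [PySem.List.max?, List.filterMap_map, Function.comp]
  congr 1
  funext acc x
  cases acc <;> rfl
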